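-- pv_equiv track=rewrite | github.com/mukeshmithrakumar/papyri | events/extractor/lambda_handler.py | join_text
-- ===== SOURCE A (Python) =====
-- def join_text(raw_text):
--     """Function to Join paragraphs together"""
--     joined_text = []
--     line = ''
--     for i in range(len(raw_text)):
--         if (len(raw_text[i]) > 1) and (raw_text[i][-1] == '\n'):
--             line += raw_text[i]
--         if (raw_text[i] == '\n'):
--             joined_text.append(line)
--             line = ''
--     return joined_text
-- ===== SOURCE B (Python) =====
-- def join_text(raw_text):
--     """Function to Join paragraphs together"""
--     out = []
--     rest = raw_text
--     while '\n' in rest: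
--         i = rest.index('\n')
--         out.append(''.join(x for x in rest[:i] if len(x) > 1 and x.endswith('\n')))
--         rest = rest[i + 1:]
--     return out
-- ===== Notes on version B (the rewrite author's own statement) =====
-- stated objective: faster
-- what changed: A streams once over the list with a running 'line' string accumulator flushed at each '\n'; B repeatedly finds the next '\n' delimiter with list.index, filter-and-joins the whole segment before it in one str.join, and continues on the remaining slice.
import Mathlib
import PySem

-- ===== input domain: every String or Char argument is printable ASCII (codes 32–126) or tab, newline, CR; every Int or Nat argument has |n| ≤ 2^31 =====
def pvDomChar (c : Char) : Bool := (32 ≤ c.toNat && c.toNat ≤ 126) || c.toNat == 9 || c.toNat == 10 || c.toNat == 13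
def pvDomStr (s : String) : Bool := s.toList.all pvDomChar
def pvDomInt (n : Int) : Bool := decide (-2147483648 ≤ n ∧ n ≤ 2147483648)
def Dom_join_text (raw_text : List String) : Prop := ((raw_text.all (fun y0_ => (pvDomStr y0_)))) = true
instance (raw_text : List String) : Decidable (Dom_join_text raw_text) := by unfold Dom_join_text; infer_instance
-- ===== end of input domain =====

-- B replaces A's streaming accumulator with a find-next-delimiter loop: repeatedly locate the next '\n',
-- filter-and-join the segment before it, and continue on the remainder (objective: faster; measured constant-factor per-segment str.join vs per-element concatenation).


-- ===== PORT A =====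
-- A streams over the list keeping an accumulator `line`; each element ending in '\n' with len > 1 is
-- appended to `line`, and each element equal to '\n' flushes `line` into the output.
def join_text (raw_text : List String) : List String :=
  (raw_text.foldl
    (fun (st : List String × String) s =>
      -- if (len(raw_text[i]) > 1) and (raw_text[i][-1] == '\n'): line += raw_text[i]
      let line := if PySem.Str.len s > 1 && (PySem.Str.pyGet? s (-1) == some '\n')
        then st.2 ++ s else st.2
      -- if (raw_text[i] == '\n'): joined_text.append(line); line = ''
      if s == "\n" then (st.1 ++ [line], "") else (st.1, line))
    ([], "")).1

-- ===== PORT B =====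
-- Python's filter predicate: len(x) > 1 and x.endswith('\n')
def pvKeepB (x : String) : Bool := PySem.Str.len x > 1 && PySem.Str.endswith x "\n"

-- The while loop of Source B: `'\n' in rest` plus `rest.index('\n')` are ported together as one
-- match on PySem.List.index? (some i ↔ the membership test succeeds and i is the index).
def pvAltLoop (out : List String) (rest : List String) : List String :=
  match h : PySem.List.index? rest "\n" with
  | none => out
  | some i =>
    pvAltLoop
      (out ++ [PySem.Str.join "" ((PySem.List.slice rest none (some (i : Int))).filter pvKeepB)])
      (PySem.List.slice rest (some ((i : Int) + 1)) none)
termination_by rest.length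
decreasing_by
  obtain ⟨hk, -, -⟩ := PySem.List.getElem_of_index?_eq_some h
  have hc : ((i : Int) + 1) = ((i + 1 : Nat) : Int) := by push_cast; ring
  rw [hc, PySem.List.slice_from_natCast]
  simp
  omega

def join_text_alt (raw_text : List String) : List String := pvAltLoop [] raw_text

-- ===== PRECONDITION & SPEC =====
def Spec_join_text (raw_text : List String) (out : List String) : Prop := out = join_text_alt raw_text
instance (raw_text : List String) (out : List String) : Decidable (Spec_join_text raw_text out) := by unfold Spec_join_text; infer_instance

-- ===== CLAIM (what is proved, stated in full; the proofs are below) =====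
def Claim_equal_join_text : Prop := ∀ (raw_text : List String), Dom_join_text raw_text → Spec_join_text raw_text (join_text raw_text)

-- ===== LEMMAS AND PROOFS =====

-- A's step function, named for the lemmas.
def pvStepA (st : List String × String) (s : String) : List String × String :=
  let line := if PySem.Str.len s > 1 && (PySem.Str.pyGet? s (-1) == some '\n')
    then st.2 ++ s else st.2
  if s == "\n" then (st.1 ++ [line], "") else (st.1, line)

theorem pvJoinTextEqFold (raw_text : List String) :
    join_text raw_text = (raw_text.foldl pvStepA ([], "")).1 := rfl

-- last-char test equals suffix test, on char lists
theorem pvLastEqEndswith (cs : List Char) :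
    (PySem.List.pyGet? cs (-1) == some '\n') = PySem.Chars.endswith cs ['\n'] := by
  rw [PySem.List.pyGet?_neg_one]
  rcases h : PySem.Chars.endswith cs ['\n'] with _ | _
  · rw [Bool.eq_false_iff] at *
    intro he
    simp only [beq_iff_eq, List.getLast?_eq_some_iff] at he
    exact h (PySem.Chars.endswith_iff cs ['\n'] |>.mpr (by obtain ⟨l, hl⟩ := he; exact ⟨l, hl.symm⟩))
  · obtain ⟨l, hl⟩ := PySem.Chars.endswith_iff cs ['\n'] |>.mp h
    simp [← hl]

-- A's keep-condition agrees with B's pvKeepB.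
theorem pvKeepEq (s : String) :
    (PySem.Str.len s > 1 && (PySem.Str.pyGet? s (-1) == some '\n')) = pvKeepB s := by
  unfold pvKeepB
  rw [PySem.Str.pyGet?_eq, PySem.Chars.pyGet?_eq_listPyGet?, PySem.Str.endswith_eq]
  congr 1
  exact pvLastEqEndswith s.toList

theorem pvJoinEmptyCons (s : String) (l : List String) :
    PySem.Str.join "" (s :: l) = s ++ PySem.Str.join "" l := by
  apply String.toList_injective ?_
  simp [PySem.Str.toList_join]
  cases l with
  | nil => simp [PySem.Chars.join_singleton, PySem.Chars.join_nil]
  | cons t ts => simp [PySem.Chars.join_cons_cons]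

-- On a newline-free prefix, A's fold only grows `line`, by the joined filtered elements.
theorem pvFoldNoNl (pre : List String) (out : List String) (line : String)
    (h : "\n" ∉ pre) :
    pre.foldl pvStepA (out, line) =
      (out, line ++ PySem.Str.join "" (pre.filter pvKeepB)) := by
  induction pre generalizing line with
  | nil => simp [PySem.Str.join, String.append_empty]
  | cons s pre' ih =>
    have hs : s ≠ "\n" := fun he => h (he ▸ List.mem_cons_self)
    have h' : "\n" ∉ pre' := fun hm => h (List.mem_cons_of_mem _ hm)
    rw [List.foldl_cons]
    have hstep : pvStepA (out, line) s = (out, if pvKeepB s then line ++ s else line) := by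
      unfold pvStepA
      rw [pvKeepEq]
      simp [hs]
    rw [hstep, ih _ h']
    rcases hk : pvKeepB s with _ | _
    · simp [hk]
    · simp [hk, pvJoinEmptyCons, String.append_assoc]

-- Main loop invariant: A's fold from (out, "") equals B's loop from out.
theorem pvMain (out rest : List String) :
    (rest.foldl pvStepA (out, "")).1 = pvAltLoop out rest := by
  induction out, rest using pvAltLoop.induct with
  | case1 out rest h =>
    have hnm : "\n" ∉ rest := (PySem.List.index?_eq_none_iff rest "\n").mp h
    rw [pvFoldNoNl rest out "" hnm, pvAltLoop]
    split
    · rfl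
    · rename_i i hi
      rw [hi] at h
      cases h
  | case2 out rest i h ih =>
    obtain ⟨pre, suf, hrest, hlen, hnm⟩ := (PySem.List.index?_eq_some_iff rest "\n" i).mp h
    have hslice1 : PySem.List.slice rest none (some (i : Int)) = pre := by
      rw [PySem.List.slice_to_natCast, hrest, ← hlen, List.take_left]
    have hslice2 : PySem.List.slice rest (some ((i : Int) + 1)) none = suf := by
      have hc : ((i : Int) + 1) = ((i + 1 : Nat) : Int) := by push_cast; ring
      rw [hc, PySem.List.slice_from_natCast, hrest, ← hlen]
      rw [show pre ++ "\n" :: suf = (pre ++ ["\n"]) ++ suf by simp]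
      rw [show pre.length + 1 = (pre ++ ["\n"]).length by simp]
      exact List.drop_left
    rw [hslice1, hslice2] at ih
    have hstep : pvStepA (out, "" ++ PySem.Str.join "" (pre.filter pvKeepB)) "\n" =
        (out ++ [PySem.Str.join "" (pre.filter pvKeepB)], "") := by
      simp [pvStepA]
    have hL : (rest.foldl pvStepA (out, "")).1 =
        (suf.foldl pvStepA (out ++ [PySem.Str.join "" (pre.filter pvKeepB)], "")).1 := by
      rw [hrest, List.foldl_append, pvFoldNoNl pre out "" hnm, List.foldl_cons, hstep]
    rw [hL, ih]
    conv_rhs => rw [pvAltLoop]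
    split
    · rename_i hn
      rw [hn] at h
      cases h
    · rename_i i' hi
      rw [hi] at h
      injection h with h'
      subst h'
      rw [hslice1, hslice2]

-- ===== VERDICT (by name: the statement is the Claim_ definition above) =====
theorem join_text_spec : Claim_equal_join_text := by
  intro raw_text _
  unfold Spec_join_text join_text_alt
  rw [pvJoinTextEqFold, pvMain]
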